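-- pv_equiv track=rewrite | github.com/yanny2five/paperfile-web | modules/edit_fix_service.py | get_exact_title_duplicate_groups
-- ===== SOURCE A (Python) =====
-- from collections import defaultdict
-- from typing import Any, Dict, List, Optional, Set, Tuple
--
-- def normalize_title_key(title: str) -> str:
--     return " ".join(str(title or "").lower().split())
--
-- def get_exact_title_duplicate_groups(records: List[dict]) -> List[Tuple[str, List[dict]]]:
--     """
--     Web helper: same normalized title (case/space collapsed), 2+ records.
--     Not the desktop duplicatetitles.py LSH/similarity workflow.
--     """
--     m: Dict[str, List[dict]] = defaultdict(list)
--     for r in records: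
--         k = normalize_title_key(str(r.get("title", "")))
--         if k:
--             m[k].append(r)
--     groups = [(k, recs) for k, recs in m.items() if len(recs) >= 2]
--     groups.sort(key=lambda t: (-len(t[1]), t[0][:80]))
--     return groups
-- ===== SOURCE B (Python) =====
-- def normalize_title_key(title: str) -> str:
--     return " ".join(str(title or "").lower().split())
--
-- def get_exact_title_duplicate_groups(records):
--     # Alternative decomposition: compute each record's key once, take the
--     # distinct non-empty keys in first-occurrence order, and collect each
--     # group with a per-key filter instead of accumulating into a dict.
--     keys = [normalize_title_key(str(r.get("title", ""))) for r in records]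
--     order = [k for k in dict.fromkeys(keys) if k]
--     groups = [(k, [r for r, kk in zip(records, keys) if kk == k]) for k in order]
--     groups = [g for g in groups if len(g[1]) >= 2]
--     groups.sort(key=lambda t: (-len(t[1]), t[0][:80]))
--     return groups
-- ===== Notes on version B (the rewrite author's own statement) =====
-- stated objective: alternative
-- what changed: Replaces the defaultdict accumulation with a key-precomputation pass: normalized keys are computed once into a parallel list, distinct non-empty keys are taken in first-occurrence order via dict.fromkeys, and each group is gathered by filtering the zipped record/key list, followed by the same >=2 filter and final sort.
import Mathlib
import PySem

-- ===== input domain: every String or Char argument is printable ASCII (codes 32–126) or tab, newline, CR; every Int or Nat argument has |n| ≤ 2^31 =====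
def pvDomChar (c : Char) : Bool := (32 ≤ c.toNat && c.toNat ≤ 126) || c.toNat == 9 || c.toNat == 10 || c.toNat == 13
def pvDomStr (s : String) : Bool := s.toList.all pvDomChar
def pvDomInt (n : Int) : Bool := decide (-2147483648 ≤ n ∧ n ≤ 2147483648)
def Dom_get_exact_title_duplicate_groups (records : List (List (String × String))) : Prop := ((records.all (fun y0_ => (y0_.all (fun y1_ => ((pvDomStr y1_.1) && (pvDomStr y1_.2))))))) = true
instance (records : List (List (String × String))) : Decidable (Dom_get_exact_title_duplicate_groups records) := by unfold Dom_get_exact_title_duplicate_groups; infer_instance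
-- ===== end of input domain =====

-- B replaces A's defaultdict accumulation with a precomputed key list, the distinct
-- non-empty keys in first-occurrence order, and a per-key filter (objective: alternative).

-- normalize_title_key(title) = " ".join(str(title or "").lower().split())
-- ('str(title or "")' is the identity on a string argument: for title = "" it yields "").
def normalizeTitleKey (title : String) : String :=
  PySem.Str.join " " (PySem.Str.split₀ (PySem.Str.lower title))

-- k = normalize_title_key(str(r.get("title", "")))  (r is a Python dict; str() of a str is the identity)
def recKey (r : List (String × String)) : String :=
  normalizeTitleKey ((PySem.Dict.ofList r).getD "title" "")

-- ===== PORT A =====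
def get_exact_title_duplicate_groups (records : List (List (String × String))) : List (String × (List (List (String × String)))) :=
  let m : PySem.Dict String (List (List (String × String))) :=
    records.foldl (fun m r =>
      let k := recKey r
      if k == "" then m else m.modify k [] (· ++ [r])) PySem.Dict.empty
  let groups := m.items.filter (fun p => 2 ≤ p.2.length)
  PySem.List.sorted2 groups (fun t => -(t.2.length : Int)) (fun t => PySem.Str.slice t.1 none (some 80)) false

-- ===== PORT B =====
def get_exact_title_duplicate_groups_alt (records : List (List (String × String))) : List (String × (List (List (String × String)))) :=
  let keys := records.map recKey
  let order := (PySem.List.dedup keys).filter (fun k => !(k == ""))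
  let groups := order.map (fun k => (k, ((records.zip keys).filter (fun p => p.2 == k)).map (·.1)))
  let groups2 := groups.filter (fun g => 2 ≤ g.2.length)
  PySem.List.sorted2 groups2 (fun t => -(t.2.length : Int)) (fun t => PySem.Str.slice t.1 none (some 80)) false

-- ===== PRECONDITION & SPEC =====
def Spec_get_exact_title_duplicate_groups (records : List (List (String × String))) (out : List (String × (List (List (String × String))))) : Prop := out = get_exact_title_duplicate_groups_alt records
instance (records : List (List (String × String))) (out : List (String × (List (List (String × String))))) : Decidable (Spec_get_exact_title_duplicate_groups records out) := by unfold Spec_get_exact_title_duplicate_groups; infer_instance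

-- ===== CLAIM (what is proved, stated in full; the proofs are below) =====
def Claim_equal_get_exact_title_duplicate_groups : Prop := ∀ (records : List (List (String × String))), Dom_get_exact_title_duplicate_groups records → Spec_get_exact_title_duplicate_groups records (get_exact_title_duplicate_groups records)

-- ===== LEMMAS AND PROOFS =====

-- Collecting a group by zipping with the precomputed key list equals filtering by key.
theorem zip_keys_filter (records : List (List (String × String))) (k : String) :
    ((records.zip (records.map recKey)).filter (fun p => p.2 == k)).map (·.1)
      = records.filter (fun r => recKey r == k) := by
  induction records with
  | nil => rfl
  | cons r rs ih =>
    simp only [List.map_cons, List.zip_cons_cons, List.filter_cons]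
    by_cases h : recKey r == k
    · simp [h, ih]
    · simp [h, ih]

theorem dedup_snoc {α : Type} [BEq α] (xs : List α) (c : α) :
    PySem.List.dedup (xs ++ [c])
      = if (PySem.List.dedup xs).contains c then PySem.List.dedup xs
        else PySem.List.dedup xs ++ [c] := by
  simp [PySem.List.dedup, PySem.Set.ofList, List.foldl_append, PySem.Set.add, PySem.Set.contains]

set_option maxHeartbeats 1000000 in
theorem fold_items_eq (records : List (List (String × String))) :
    (records.foldl (fun m r =>
        let k := recKey r
        if k == "" then m else m.modify k [] (· ++ [r])) PySem.Dict.empty).items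
      = ((PySem.List.dedup (records.map recKey)).filter (fun k => !(k == ""))).map
          (fun k => (k, records.filter (fun r => recKey r == k))) := by
  induction records using List.reverseRecOn with
  | nil => rfl
  | append_singleton rs r ih =>
    rw [List.foldl_append, List.map_append, List.map_cons, List.map_nil, dedup_snoc]
    simp only [List.foldl_cons, List.foldl_nil]
    have hfilter : ∀ k, k ≠ recKey r →
        (rs ++ [r]).filter (fun x => recKey x == k) = rs.filter (fun x => recKey x == k) := by
      intro k hk
      rw [List.filter_append]
      have : (recKey r == k) = false := by simp [beq_eq_false_iff_ne]; exact fun h => hk h.symm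
      simp [this]
    by_cases hce : recKey r = ""
    · have hb : (recKey r == "") = true := by simp [hce]
      simp only [hb, if_true]
      have hmap : ∀ (l : List String),
          (l.filter (fun k => !(k == ""))).map (fun k => (k, (rs ++ [r]).filter (fun x => recKey x == k)))
            = (l.filter (fun k => !(k == ""))).map (fun k => (k, rs.filter (fun x => recKey x == k))) := by
        intro l
        apply List.map_congr_left
        intro k hk
        have hkne : k ≠ "" := by have := (List.mem_filter.mp hk).2; simpa using this
        rw [hfilter k (by rw [hce]; exact hkne)]
      split
      · rw [ih]; exact (hmap _).symm
      · rw [List.filter_append, ih]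
        have : List.filter (fun k => !(k == "")) [recKey r] = [] := by simp [hce]
        rw [this, List.append_nil]
        exact (hmap _).symm
    · have hcne : (recKey r == "") = false := by simp [hce]
      simp only [hcne, Bool.false_eq_true, if_false]
      set d := rs.foldl (fun m r =>
        let k := recKey r
        if k == "" then m else m.modify k [] (· ++ [r])) PySem.Dict.empty with hd
      clear_value d
      have hkeysnd : d.keys.Nodup := by
        show (d.items.map Prod.fst).Nodup
        rw [ih, List.map_map]
        have h1 : (Prod.fst ∘ (fun k => (k, rs.filter (fun x => recKey x == k)))) = id := rfl
        rw [h1, List.map_id]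
        exact (PySem.List.nodup_dedup _).filter _
      by_cases hmem : recKey r ∈ PySem.List.dedup (rs.map recKey)
      · rw [if_pos (by simpa using hmem)]
        have hmemit : (recKey r, rs.filter (fun x => recKey x == recKey r)) ∈ d.items := by
          rw [ih]
          exact List.mem_map_of_mem (List.mem_filter.mpr ⟨hmem, by simp [hce]⟩)
        have hcont : d.contains (recKey r) = true := by
          simp only [PySem.Dict.contains, List.any_eq_true]
          exact ⟨_, hmemit, by simp⟩
        have hget : d.getD (recKey r) [] = rs.filter (fun x => recKey x == recKey r) :=
          PySem.Dict.getD_of_mem_items d hmemit hkeysnd []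
        simp only [PySem.Dict.modify, hget]
        rw [PySem.Dict.items_insert_of_contains _ _ hcont, ih, List.map_map]
        apply List.map_congr_left
        intro k hk
        have hkne : k ≠ "" := by have := (List.mem_filter.mp hk).2; simpa using this
        simp only [Function.comp]
        by_cases hkc : k = recKey r
        · subst hkc
          simp only [beq_self_eq_true, if_true]
          rw [List.filter_append]
          simp
        · have h2 : (k == recKey r) = false := by simp [hkc]
          simp only [h2, Bool.false_eq_true, if_false]
          rw [hfilter k hkc]
      · rw [if_neg (by simpa using hmem)]
        have hnotin : recKey r ∉ rs.map recKey := fun h => hmem ((PySem.List.mem_dedup _ _).mpr h)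
        have hcont : d.contains (recKey r) = false := by
          simp only [PySem.Dict.contains, List.any_eq_false]
          intro p hp
          rw [ih] at hp
          obtain ⟨k, hk, rfl⟩ := List.mem_map.mp hp
          have hkmem : k ∈ PySem.List.dedup (rs.map recKey) := (List.mem_filter.mp hk).1
          intro hb
          have hkr : k = recKey r := by simpa using hb
          exact hmem (hkr ▸ hkmem)
        have hgetd : d.getD (recKey r) [] = [] := by
          simp only [PySem.Dict.getD, PySem.Dict.get?]
          have : List.find? (fun p => p.1 == recKey r) d.items = none := by
            rw [List.find?_eq_none]
            intro p hp
            have := hcont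
            simp only [PySem.Dict.contains, List.any_eq_false] at this
            exact fun hb => by simpa [hb] using this p hp
          simp [this]
        simp only [PySem.Dict.modify, hgetd, List.nil_append]
        rw [PySem.Dict.items_insert_of_not_contains d [r] hcont]
        rw [ih]
        rw [List.filter_append]
        have h3 : List.filter (fun k => !(k == "")) [recKey r] = [recKey r] := by simp [hce]
        rw [h3, List.map_append, List.map_cons, List.map_nil]
        have hnil : rs.filter (fun x => recKey x == recKey r) = [] := by
          rw [List.filter_eq_nil_iff]
          intro x hx
          simp only [beq_iff_eq]
          exact fun h => hnotin (h ▸ List.mem_map_of_mem hx)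
        have hlast : (rs ++ [r]).filter (fun x => recKey x == recKey r) = [r] := by
          rw [List.filter_append, hnil]
          simp
        rw [hlast]
        have hmapeq : List.map (fun k => (k, List.filter (fun x => recKey x == k) (rs ++ [r])))
              (List.filter (fun k => !(k == "")) (PySem.List.dedup (List.map recKey rs)))
            = List.map (fun k => (k, List.filter (fun x => recKey x == k) rs))
              (List.filter (fun k => !(k == "")) (PySem.List.dedup (List.map recKey rs))) := by
          apply List.map_congr_left
          intro k hk
          have hkmem : k ∈ PySem.List.dedup (List.map recKey rs) := (List.mem_filter.mp hk).1
          rw [hfilter k (fun h => hmem (h ▸ hkmem))]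
        rw [hmapeq]

-- ===== VERDICT (by name: the statement is the Claim_ definition above) =====
theorem get_exact_title_duplicate_groups_spec : Claim_equal_get_exact_title_duplicate_groups := by
  intro records _
  show get_exact_title_duplicate_groups records = get_exact_title_duplicate_groups_alt records
  unfold get_exact_title_duplicate_groups get_exact_title_duplicate_groups_alt
  simp only []
  rw [fold_items_eq]
  have hmaps : ((PySem.List.dedup (records.map recKey)).filter (fun k => !(k == ""))).map
        (fun k => (k, ((records.zip (records.map recKey)).filter (fun p => p.2 == k)).map (·.1)))
      = ((PySem.List.dedup (records.map recKey)).filter (fun k => !(k == ""))).map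
        (fun k => (k, records.filter (fun r => recKey r == k))) := by
    apply List.map_congr_left
    intro k _
    rw [zip_keys_filter]
  rw [hmaps]
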